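-- pv_equiv track=rewrite | github.com/RaM2VaR/ActiveSearch2D | active_search_3D.py | create_mesh
-- ===== SOURCE A (Python) =====
-- def create_mesh(dimX, dimY, dimZ):
--     nw_dict = {}
--     cords = []
--     for z in range(dimZ):
--         for y in range(dimY):
--             for x in range(dimX):
--                 cords.append((x, y, z))
--     for idx, line in enumerate(cords):
--         nw_dict[str(idx)] = {'cor': cords[idx]}
--
--     return nw_dict
-- ===== SOURCE B (Python) =====
-- def create_mesh(dimX, dimY, dimZ):
--     if dimX <= 0 or dimY <= 0 or dimZ <= 0:
--         return {}
--     plane = dimX * dimY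
--     return {str(i): {'cor': (i % dimX, (i // dimX) % dimY, i // plane)}
--             for i in range(plane * dimZ)}
-- ===== Notes on version B (the rewrite author's own statement) =====
-- stated objective: simpler
-- what changed: Replaces the two-phase build (triple nested loop appending a coordinate list, then a second enumerate pass indexing back into it) by a single loop over range(dimX*dimY*dimZ) that computes each coordinate directly by div/mod arithmetic.
import Mathlib
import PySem

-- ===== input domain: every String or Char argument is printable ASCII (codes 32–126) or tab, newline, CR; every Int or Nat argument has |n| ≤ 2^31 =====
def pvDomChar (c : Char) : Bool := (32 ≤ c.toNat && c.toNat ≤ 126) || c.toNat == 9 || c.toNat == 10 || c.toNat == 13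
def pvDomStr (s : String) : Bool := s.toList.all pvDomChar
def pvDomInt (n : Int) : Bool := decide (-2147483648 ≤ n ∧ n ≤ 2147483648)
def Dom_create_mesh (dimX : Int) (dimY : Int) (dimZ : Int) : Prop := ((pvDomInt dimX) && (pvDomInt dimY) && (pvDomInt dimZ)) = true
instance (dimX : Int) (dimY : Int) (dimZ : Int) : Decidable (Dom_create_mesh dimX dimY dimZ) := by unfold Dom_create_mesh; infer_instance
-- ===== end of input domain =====

-- B replaces A's build-list-then-enumerate construction by one arithmetic index→coordinate pass (simpler; same O(dimX*dimY*dimZ) cost).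


-- ===== PORT A =====
-- triple nested loop building cords, then a second pass indexing cords[idx];
-- cords[idx] is ported as pyGetD (idx produced by enumerate is always in range, so Python never raises here)
def create_mesh (dimX : Int) (dimY : Int) (dimZ : Int) : List (String × List (String × Int × Int × Int)) :=
  let cords : List (Int × Int × Int) :=
    (PySem.List.pyRange 0 dimZ).foldl (fun acc z =>
      (PySem.List.pyRange 0 dimY).foldl (fun acc y =>
        (PySem.List.pyRange 0 dimX).foldl (fun acc x => acc ++ [(x, y, z)]) acc) acc) []
  let nw_dict : PySem.Dict String (List (String × Int × Int × Int)) :=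
    (PySem.List.enumerate cords).foldl (fun d p =>
      d.insert (PySem.Int.toStr p.1) [("cor", PySem.List.pyGetD cords p.1 (0, 0, 0))]) PySem.Dict.empty
  nw_dict.items

-- ===== PORT B =====
-- single loop over range(dimX*dimY*dimZ), coordinate by div/mod arithmetic
def create_mesh_alt (dimX : Int) (dimY : Int) (dimZ : Int) : List (String × List (String × Int × Int × Int)) :=
  if dimX ≤ 0 ∨ dimY ≤ 0 ∨ dimZ ≤ 0 then []
  else
    let plane := dimX * dimY
    ((PySem.List.pyRange 0 (plane * dimZ)).foldl (fun d i =>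
        d.insert (PySem.Int.toStr i)
          [("cor", (PySem.Int.mod i dimX, PySem.Int.mod (PySem.Int.floordiv i dimX) dimY,
                    PySem.Int.floordiv i plane))]) PySem.Dict.empty).items

-- ===== PRECONDITION & SPEC =====
def Spec_create_mesh (dimX : Int) (dimY : Int) (dimZ : Int) (out : List (String × List (String × Int × Int × Int))) : Prop := out = create_mesh_alt dimX dimY dimZ
instance (dimX : Int) (dimY : Int) (dimZ : Int) (out : List (String × List (String × Int × Int × Int))) : Decidable (Spec_create_mesh dimX dimY dimZ out) := by unfold Spec_create_mesh; infer_instance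

-- ===== CLAIM (what is proved, stated in full; the proofs are below) =====
def Claim_equal_create_mesh : Prop := ∀ (dimX : Int) (dimY : Int) (dimZ : Int), Dom_create_mesh dimX dimY dimZ → Spec_create_mesh dimX dimY dimZ (create_mesh dimX dimY dimZ)

-- ===== LEMMAS AND PROOFS =====

-- mixed-radix split of a flatMap over range (m*n)
theorem pv_flatMap_range_mul {α : Type} (m : Nat) (F : Nat → Nat → List α) :
    ∀ n : Nat, (List.range (m * n)).flatMap (fun i => F (i % m) (i / m))
      = (List.range n).flatMap (fun q => (List.range m).flatMap (fun r => F r q)) := by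
  intro n
  induction n with
  | zero => simp
  | succ n ih =>
    rw [Nat.mul_succ, List.range_add, List.range_succ, List.flatMap_append, ih,
        List.flatMap_append, List.flatMap_map]
    congr 1
    simp only [List.flatMap_singleton]
    refine List.flatMap_congr (fun r hr => ?_)
    have hrm : r < m := List.mem_range.mp hr
    have hm : 0 < m := Nat.lt_of_le_of_lt (Nat.zero_le r) hrm
    rw [Nat.mul_add_mod, Nat.mod_eq_of_lt hrm, Nat.mul_add_div hm,
        Nat.div_eq_of_lt hrm, Nat.add_zero]

-- the arithmetic coordinate list equals the nested-loop coordinate list (Nat form)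
theorem pv_coords_nat {α : Type} (a b c : Nat) (f : Nat → Nat → Nat → α) :
    (List.range (a * b * c)).map (fun k => f (k % a) (k / a % b) (k / a / b))
      = (List.range c).flatMap (fun z => (List.range b).flatMap (fun y =>
          (List.range a).map (fun x => f x y z))) := by
  have h1 := pv_flatMap_range_mul a (fun r q => [f r (q % b) (q / b)]) (b * c)
  have h2 := pv_flatMap_range_mul b
    (fun y z => (List.range a).flatMap (fun r => [f r y z])) c
  calc (List.range (a * b * c)).map (fun k => f (k % a) (k / a % b) (k / a / b))
      = (List.range (a * (b * c))).flatMap (fun k => [f (k % a) (k / a % b) (k / a / b)]) := by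
        rw [← Nat.mul_assoc, List.map_eq_flatMap]
    _ = (List.range (b * c)).flatMap (fun q => (List.range a).flatMap (fun r => [f r (q % b) (q / b)])) := h1
    _ = (List.range c).flatMap (fun z => (List.range b).flatMap (fun y =>
          (List.range a).flatMap (fun r => [f r y z]))) := h2
    _ = _ := by simp only [← List.map_eq_flatMap]

-- cords, as A builds it, equals B's arithmetic map over range (dimX*dimY*dimZ), for positive dims
theorem pv_cords_eq (dimX dimY dimZ : Int) (hx : 0 < dimX) (hy : 0 < dimY) (hz : 0 < dimZ) :
    (PySem.List.pyRange 0 dimZ).flatMap (fun z =>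
      (PySem.List.pyRange 0 dimY).flatMap (fun y =>
        (PySem.List.pyRange 0 dimX).map (fun x => ((x, y, z) : Int × Int × Int))))
    = (PySem.List.pyRange 0 (dimX * dimY * dimZ)).map (fun i =>
        (PySem.Int.mod i dimX, PySem.Int.mod (PySem.Int.floordiv i dimX) dimY,
         PySem.Int.floordiv i (dimX * dimY))) := by
  obtain ⟨a, rfl⟩ := Int.eq_ofNat_of_zero_le hx.le
  obtain ⟨b, rfl⟩ := Int.eq_ofNat_of_zero_le hy.le
  obtain ⟨c, rfl⟩ := Int.eq_ofNat_of_zero_le hz.le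
  have hab : ((a * b : Nat) : Int) = (a : Int) * b := by push_cast; ring
  have habc : ((a * b * c : Nat) : Int) = (a : Int) * b * c := by push_cast; ring
  have hR : (PySem.List.pyRange 0 ((a : Int) * b * c)).map (fun i =>
        (PySem.Int.mod i (a : Int), PySem.Int.mod (PySem.Int.floordiv i (a : Int)) (b : Int),
         PySem.Int.floordiv i ((a : Int) * (b : Int))))
      = (List.range (a * b * c)).map (fun k =>
          (((k % a : Nat) : Int), ((k / a % b : Nat) : Int), ((k / a / b : Nat) : Int))) := by
    rw [← habc, PySem.List.pyRange_zero_natCast, List.map_map]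
    refine List.map_congr_left (fun k _ => ?_)
    simp only [Function.comp_apply, ← hab, PySem.Int.mod_natCast, PySem.Int.floordiv_natCast,
      Nat.div_div_eq_div_mul]
  calc (PySem.List.pyRange 0 (c : Int)).flatMap (fun z =>
        (PySem.List.pyRange 0 (b : Int)).flatMap (fun y =>
          (PySem.List.pyRange 0 (a : Int)).map (fun x => ((x, y, z) : Int × Int × Int))))
      = (List.range c).flatMap (fun z => (List.range b).flatMap (fun y =>
          (List.range a).map (fun x => (((x : Nat) : Int), ((y : Nat) : Int), ((z : Nat) : Int))))) := by
        simp only [PySem.List.pyRange_zero_natCast, List.flatMap_map, List.map_map,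
          Function.comp_def]
    _ = _ := by
        rw [← pv_coords_nat a b c (fun x y z => (((x : Nat) : Int), ((y : Nat) : Int), ((z : Nat) : Int))),
          ← hR]

theorem create_mesh_eq_alt (dimX dimY dimZ : Int) :
    create_mesh dimX dimY dimZ = create_mesh_alt dimX dimY dimZ := by
  unfold create_mesh create_mesh_alt
  by_cases hdeg : dimX ≤ 0 ∨ dimY ≤ 0 ∨ dimZ ≤ 0
  · -- some dimension is ≤ 0: cords is empty, both sides are []
    have hcords : (PySem.List.pyRange 0 dimZ).foldl (fun acc z =>
        (PySem.List.pyRange 0 dimY).foldl (fun acc y =>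
          (PySem.List.pyRange 0 dimX).foldl (fun acc x => acc ++ [(x, y, z)]) acc) acc)
        ([] : List (Int × Int × Int)) = [] := by
      simp only [PySem.List.foldl_append_singleton_eq_map, PySem.List.foldl_append_eq_flatMap]
      rcases hdeg with h | h | h
      · rw [PySem.List.pyRange_one_eq_nil h]; simp
      · rw [PySem.List.pyRange_one_eq_nil h]; simp
      · rw [PySem.List.pyRange_one_eq_nil h]; simp
    rw [hcords]
    simp [hdeg, PySem.Dict.empty]
  · push Not at hdeg
    obtain ⟨hx, hy, hz⟩ := hdeg
    simp only [if_neg (by push Not; exact ⟨hx, hy, hz⟩ : ¬ (dimX ≤ 0 ∨ dimY ≤ 0 ∨ dimZ ≤ 0))]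
    -- cords as a flatMap, then as B's arithmetic map
    have hcords : (PySem.List.pyRange 0 dimZ).foldl (fun acc z =>
        (PySem.List.pyRange 0 dimY).foldl (fun acc y =>
          (PySem.List.pyRange 0 dimX).foldl (fun acc x => acc ++ [(x, y, z)]) acc) acc)
        ([] : List (Int × Int × Int))
        = (PySem.List.pyRange 0 (dimX * dimY * dimZ)).map (fun i =>
            (PySem.Int.mod i dimX, PySem.Int.mod (PySem.Int.floordiv i dimX) dimY,
             PySem.Int.floordiv i (dimX * dimY))) := by
      simp only [PySem.List.foldl_append_singleton_eq_map, PySem.List.foldl_append_eq_flatMap,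
        List.nil_append]
      exact pv_cords_eq dimX dimY dimZ hx hy hz
    rw [hcords]
    set coord : Int → Int × Int × Int := fun i =>
      (PySem.Int.mod i dimX, PySem.Int.mod (PySem.Int.floordiv i dimX) dimY,
       PySem.Int.floordiv i (dimX * dimY)) with hcoord
    set n : Int := dimX * dimY * dimZ with hn
    have hlen : PySem.List.len ((PySem.List.pyRange 0 n).map coord) = n := by
      have hn0 : 0 ≤ n := by positivity
      simp [PySem.List.len, PySem.List.length_pyRange_one, Int.toNat_of_nonneg hn0]
    rw [PySem.List.enumerate_eq_map_pyRange ((PySem.List.pyRange 0 n).map coord) ((0 : Int), (0 : Int), (0 : Int)),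
        hlen, List.foldl_map]
    congr 1
    refine PySem.List.foldl_congr_mem _ _ _ _ (fun d i hi => ?_)
    have hib := PySem.List.mem_pyRange_one.mp hi
    rw [PySem.List.pyGetD_map_pyRange_of_nonneg coord n i _ hib.1 hib.2]

-- ===== VERDICT (by name: the statement is the Claim_ definition above) =====
theorem create_mesh_spec : Claim_equal_create_mesh := by
  intro dimX dimY dimZ _
  unfold Spec_create_mesh
  exact create_mesh_eq_alt dimX dimY dimZ
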